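-- pv_equiv track=rewrite | github.com/ddu0422/study | algorithm/baekjoon/greedy/silver2/16112.py | solution
-- ===== SOURCE A (Python) =====
-- def solution(stones, k):
--     answer = 0
--     count = 0
--
--     for stone in sorted(stones):
--         answer += count * stone
--         if count < k:
--             count += 1
--
--     return answer
-- ===== SOURCE B (Python) =====
-- def solution(stones, k):
--     # Complement/telescoping reformulation: the answer equals kk*sum(stones)
--     # minus the sum of the first kk prefix sums of the sorted list (kk = cap
--     # clamped into [0, n]).  One pass maintains the running prefix sum and the
--     # accumulated deficit; no per-element multiplier is ever computed.
--     ss = sorted(stones)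
--     kk = min(max(k, 0), len(ss))
--     total = sum(ss)
--     prefix = deficit = 0
--     for s in ss[:kk]:
--         prefix += s
--         deficit += prefix
--     return kk * total - deficit
-- ===== Notes on version B (the rewrite author's own statement) =====
-- stated objective: alternative
-- what changed: Instead of A's loop that multiplies each stone by an incrementing-and-capped counter, B uses the telescoping identity answer = kk*total - (sum of the first kk prefix sums of the sorted list): it maintains a running prefix sum and an accumulated deficit and never computes a per-element multiplier.
import Mathlib
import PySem

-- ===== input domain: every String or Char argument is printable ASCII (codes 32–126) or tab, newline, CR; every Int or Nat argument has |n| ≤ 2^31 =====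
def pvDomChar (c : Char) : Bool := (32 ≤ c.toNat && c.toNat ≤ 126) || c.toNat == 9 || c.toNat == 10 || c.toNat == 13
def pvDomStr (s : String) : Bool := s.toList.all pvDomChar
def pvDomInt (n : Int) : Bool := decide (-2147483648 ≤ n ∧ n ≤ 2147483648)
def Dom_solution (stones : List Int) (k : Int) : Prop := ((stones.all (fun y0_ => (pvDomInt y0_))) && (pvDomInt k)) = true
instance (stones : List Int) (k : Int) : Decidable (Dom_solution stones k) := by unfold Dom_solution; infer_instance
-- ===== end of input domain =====

-- B replaces A's capped-counter multiplier loop by the telescoping identity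
-- answer = kk*total - (sum of the first kk prefix sums of the sorted list),
-- computed with a running prefix sum (objective: alternative, same cost).

-- ===== PORT A =====
def solution (stones : List Int) (k : Int) : Int :=
  ((PySem.List.sorted stones (fun x => x) false).foldl
    (fun (st : Int × Int) stone =>
      (st.1 + st.2 * stone, if st.2 < k then st.2 + 1 else st.2))
    (0, 0)).1

-- ===== PORT B =====
def solution_alt (stones : List Int) (k : Int) : Int :=
  let ss := PySem.List.sorted stones (fun x => x) false
  let kk := min (max k 0) (ss.length : Int)
  let total := ss.foldl (· + ·) 0
  let st := (PySem.List.slice ss none (some kk)).foldl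
      (fun (p : Int × Int) s => (p.1 + s, p.2 + p.1 + s)) (0, 0)
  kk * total - st.2

-- ===== PRECONDITION & SPEC =====
def Spec_solution (stones : List Int) (k : Int) (out : Int) : Prop := out = solution_alt stones k
instance (stones : List Int) (k : Int) (out : Int) : Decidable (Spec_solution stones k out) := by unfold Spec_solution; infer_instance

-- ===== CLAIM (what is proved, stated in full; the proofs are below) =====
def Claim_equal_solution : Prop := ∀ (stones : List Int) (k : Int), Dom_solution stones k → Spec_solution stones k (solution stones k)

-- ===== LEMMAS AND PROOFS =====

-- multiplier-weighted sum: element i (0-based) of l gets weight min (c+i) kk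
def pvWsum (kk : Int) : Int → List Int → Int
  | _, [] => 0
  | c, x :: t => min c kk * x + pvWsum kk (c + 1) t

-- sum of all nonempty prefix sums of l
def pvP : List Int → Int
  | [] => 0
  | x :: t => ((t.length : Int) + 1) * x + pvP t

theorem pvSumFold (l : List Int) (a : Int) : l.foldl (· + ·) a = a + l.sum := by
  induction l generalizing a with
  | nil => simp
  | cons x t ih => simp only [List.foldl_cons, List.sum_cons]; rw [ih]; ring

theorem pvBfold (l : List Int) (r d : Int) :
    l.foldl (fun (p : Int × Int) s => (p.1 + s, p.2 + p.1 + s)) (r, d)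
      = (r + l.sum, d + (l.length : Int) * r + pvP l) := by
  induction l generalizing r d with
  | nil => simp [pvP]
  | cons x t ih =>
      simp only [List.foldl_cons, List.sum_cons, List.length_cons, pvP]
      rw [ih, Prod.mk.injEq]
      constructor <;> push_cast <;> ring

theorem pvWsum_sat (kk : Int) (l : List Int) : ∀ c c', kk ≤ c → kk ≤ c' →
    pvWsum kk c l = pvWsum kk c' l := by
  induction l with
  | nil => intro c c' _ _; rfl
  | cons x t ih =>
      intro c c' hc hc'
      simp only [pvWsum]
      rw [min_eq_right hc, min_eq_right hc', ih (c + 1) (c' + 1) (by omega) (by omega)]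

theorem pvWsum_zero (l : List Int) : ∀ c, 0 ≤ c → pvWsum 0 c l = 0 := by
  induction l with
  | nil => intro c _; rfl
  | cons x t ih =>
      intro c hc
      simp only [pvWsum, min_eq_right hc, ih (c + 1) (by omega)]
      ring

theorem pvWsum_shift (l : List Int) : ∀ kk c, pvWsum kk (c + 1) l = pvWsum (kk - 1) c l + l.sum := by
  induction l with
  | nil => intro kk c; simp [pvWsum]
  | cons x t ih =>
      intro kk c
      simp only [pvWsum, List.sum_cons]
      rw [ih]
      have : min (c + 1) kk = min c (kk - 1) + 1 := by omega
      rw [this]; ring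

theorem pvLoopA (k : Int) (l : List Int) : ∀ a c, 0 ≤ c → c ≤ max k 0 →
    (l.foldl (fun (st : Int × Int) stone =>
        (st.1 + st.2 * stone, if st.2 < k then st.2 + 1 else st.2)) (a, c)).1
      = a + pvWsum (max k 0) c l := by
  induction l with
  | nil => intro a c _ _; simp [pvWsum]
  | cons x t ih =>
      intro a c hc hck
      simp only [List.foldl_cons, pvWsum]
      by_cases h : c < k
      · rw [if_pos h, ih (a + c * x) (c + 1) (by omega) (by omega)]
        have : min c (max k 0) = c := by omega
        rw [this]; ring
      · have hce : c = max k 0 := by omega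
        rw [if_neg h, ih (a + c * x) c hc hck]
        rw [pvWsum_sat (max k 0) t c (c + 1) (by omega) (by omega)]
        have : min c (max k 0) = c := by omega
        rw [this]; ring

theorem pvMaster (l : List Int) : ∀ kk : Int, 0 ≤ kk →
    pvWsum kk 0 l = min kk (l.length : Int) * l.sum - pvP (l.take kk.toNat) := by
  induction l with
  | nil => intro kk _; simp [pvWsum, pvP]
  | cons x t ih =>
      intro kk hkk
      by_cases h0 : kk = 0
      · subst h0
        rw [pvWsum_zero (x :: t) 0 le_rfl]
        simp only [Int.toNat_zero, List.take_zero, pvP, List.length_cons]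
        have hm : min (0 : Int) ((t.length : Int) + 1) = 0 := by omega
        push_cast
        rw [hm]
        ring
      · have hkk1 : 1 ≤ kk := by omega
        have hstep : pvWsum kk 0 (x :: t) = pvWsum (kk - 1) 0 t + t.sum := by
          simp only [pvWsum]
          rw [pvWsum_shift, min_eq_left hkk]
          ring
        rw [hstep, ih (kk - 1) (by omega)]
        have hn : kk.toNat = (kk - 1).toNat + 1 := by omega
        rw [hn, List.take_succ_cons]
        simp only [pvP, List.length_take, List.sum_cons, List.length_cons]
        have hcast : ((min (kk - 1).toNat t.length : ℕ) : Int) = min (kk - 1) (t.length : Int) := by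
          push_cast; omega
        rw [hcast]
        have hmin : min kk ((t.length : Int) + 1) = min (kk - 1) (t.length : Int) + 1 := by omega
        push_cast
        rw [hmin]
        ring

-- ===== VERDICT (by name: the statement is the Claim_ definition above) =====
theorem solution_spec : Claim_equal_solution := by
  intro stones k _
  unfold Spec_solution solution
  simp only [solution_alt]
  have hK0 : (0 : Int) ≤ min (max k 0) ((PySem.List.sorted stones (fun x => x) false).length : Int) :=
    le_min (le_max_right _ _) (Int.natCast_nonneg _)
  rw [PySem.List.slice_to _ hK0, pvBfold, pvSumFold,
    pvLoopA k _ 0 0 le_rfl (le_max_right _ _), pvMaster _ (max k 0) (le_max_right _ _)]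
  have htake : (PySem.List.sorted stones (fun x => x) false).take (max k 0).toNat
      = (PySem.List.sorted stones (fun x => x) false).take
          (min (max k 0) ((PySem.List.sorted stones (fun x => x) false).length : Int)).toNat := by
    rw [List.take_eq_take_iff]
    omega
  rw [htake]
  ring
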